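-- pv_equiv track=rewrite | github.com/AlessandroI02/Oil-market-analysis | src/market_data_providers.py | _stooq_symbol_for_ticker
-- ===== SOURCE A (Python) =====
-- def _stooq_symbol_for_ticker(ticker: str) -> str | None:
--     t = str(ticker).strip()
--     if not t:
--         return None
--
--     explicit = {
--         "SPY": "spy.us",
--         "XLE": "xle.us",
--         "^TNX": "us10y",
--         "DX-Y.NYB": "usdidx",
--     }
--     if t in explicit:
--         return explicit[t]
--
--     suffix_map = {
--         ".L": ".uk",
--         ".PA": ".fr",
--         ".AS": ".nl",
--         ".MI": ".it",
--         ".TO": ".ca",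
--         ".AX": ".au",
--         ".HK": ".hk",
--         ".SA": ".br",
--         ".ST": ".se",
--     }
--
--     for suffix, mapped in suffix_map.items():
--         if t.upper().endswith(suffix):
--             base = t[: -len(suffix)]
--             return f"{base.lower()}{mapped}"
--
--     if t.startswith("^"):
--         return None
--
--     if "." not in t:
--         return f"{t.lower()}.us"
--
--     return t.lower().replace(".", "")
-- ===== SOURCE B (Python) =====
-- def _stooq_symbol_for_ticker(ticker: str) -> str | None:
--     t = str(ticker).strip()
--     if not t:
--         return None
--
--     explicit = {
--         "SPY": "spy.us",
--         "XLE": "xle.us",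
--         "^TNX": "us10y",
--         "DX-Y.NYB": "usdidx",
--     }
--     if t in explicit:
--         return explicit[t]
--
--     country = {
--         "L": ".uk",
--         "PA": ".fr",
--         "AS": ".nl",
--         "MI": ".it",
--         "TO": ".ca",
--         "AX": ".au",
--         "HK": ".hk",
--         "SA": ".br",
--         "ST": ".se",
--     }
--
--     # one forward pass over the characters builds every piece the branches need:
--     # the lowercased ticker, the lowercased ticker with dots removed, and the
--     # uppercased extension after the last dot
--     low = []       # lowercased t
--     nodot = []     # lowercased t without dots
--     ext = []       # uppercased chars after the most recent dot
--     seen_dot = False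
--     for ch in t:
--         low.append(ch.lower())
--         if ch == ".":
--             seen_dot = True
--             ext = []
--         else:
--             nodot.append(ch.lower())
--             ext.append(ch.upper())
--
--     if seen_dot:
--         mapped = country.get("".join(ext))
--         if mapped is not None:
--             return "".join(low[: -(len(ext) + 1)]) + mapped
--         if t.startswith("^"):
--             return None
--         return "".join(nodot)
--
--     if t.startswith("^"):
--         return None
--     return "".join(low) + ".us"
-- ===== Notes on version B (the rewrite author's own statement) =====
-- stated objective: alternative
-- what changed: A's staged string-method passes (nine upper().endswith scans over suffix_map, then startswith/lower/replace fallbacks) are replaced by ONE forward character scan with accumulators that simultaneously builds the lowercased ticker, the dot-free lowercased ticker and the uppercased last-dot extension, followed by O(1) branch decisions on those accumulators.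
import Mathlib
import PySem

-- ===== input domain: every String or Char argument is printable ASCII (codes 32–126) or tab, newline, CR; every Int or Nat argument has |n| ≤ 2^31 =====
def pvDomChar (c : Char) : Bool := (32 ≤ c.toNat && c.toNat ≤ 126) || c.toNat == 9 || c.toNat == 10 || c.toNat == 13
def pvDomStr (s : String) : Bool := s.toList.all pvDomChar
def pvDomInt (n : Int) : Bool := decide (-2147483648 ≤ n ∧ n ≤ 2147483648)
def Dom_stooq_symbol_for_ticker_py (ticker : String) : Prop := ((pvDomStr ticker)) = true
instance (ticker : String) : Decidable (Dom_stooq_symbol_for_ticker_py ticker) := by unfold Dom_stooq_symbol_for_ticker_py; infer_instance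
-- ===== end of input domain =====

-- B replaces A's staged string-method passes (nine upper().endswith scans, then lower/replace
-- fallbacks) by ONE forward character scan with accumulators building the lowercased ticker, the
-- dot-free lowercased ticker and the uppercased last-dot extension, then O(1) branch decisions;
-- same return value on every input (objective: alternative, no speed claim).

-- ===== PORT A =====
-- body of A after 't = str(ticker).strip()', over the char list of t
def pvStooqA (t : List Char) : Option String :=
  if t = [] then none
  else if t = ['S', 'P', 'Y'] then some "spy.us"
  else if t = ['X', 'L', 'E'] then some "xle.us"
  else if t = ['^', 'T', 'N', 'X'] then some "us10y"
  else if t = ['D', 'X', '-', 'Y', '.', 'N', 'Y', 'B'] then some "usdidx"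
  else if PySem.Chars.endswith (PySem.Chars.upper t) ['.', 'L'] then
    some (String.mk (PySem.Chars.lower (PySem.List.slice t none (some (-2))) ++ ['.', 'u', 'k']))
  else if PySem.Chars.endswith (PySem.Chars.upper t) ['.', 'P', 'A'] then
    some (String.mk (PySem.Chars.lower (PySem.List.slice t none (some (-3))) ++ ['.', 'f', 'r']))
  else if PySem.Chars.endswith (PySem.Chars.upper t) ['.', 'A', 'S'] then
    some (String.mk (PySem.Chars.lower (PySem.List.slice t none (some (-3))) ++ ['.', 'n', 'l']))
  else if PySem.Chars.endswith (PySem.Chars.upper t) ['.', 'M', 'I'] then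
    some (String.mk (PySem.Chars.lower (PySem.List.slice t none (some (-3))) ++ ['.', 'i', 't']))
  else if PySem.Chars.endswith (PySem.Chars.upper t) ['.', 'T', 'O'] then
    some (String.mk (PySem.Chars.lower (PySem.List.slice t none (some (-3))) ++ ['.', 'c', 'a']))
  else if PySem.Chars.endswith (PySem.Chars.upper t) ['.', 'A', 'X'] then
    some (String.mk (PySem.Chars.lower (PySem.List.slice t none (some (-3))) ++ ['.', 'a', 'u']))
  else if PySem.Chars.endswith (PySem.Chars.upper t) ['.', 'H', 'K'] then
    some (String.mk (PySem.Chars.lower (PySem.List.slice t none (some (-3))) ++ ['.', 'h', 'k']))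
  else if PySem.Chars.endswith (PySem.Chars.upper t) ['.', 'S', 'A'] then
    some (String.mk (PySem.Chars.lower (PySem.List.slice t none (some (-3))) ++ ['.', 'b', 'r']))
  else if PySem.Chars.endswith (PySem.Chars.upper t) ['.', 'S', 'T'] then
    some (String.mk (PySem.Chars.lower (PySem.List.slice t none (some (-3))) ++ ['.', 's', 'e']))
  else if PySem.Chars.startswith t ['^'] then none
  else if !PySem.Chars.isIn ['.'] t then some (String.mk (PySem.Chars.lower t ++ ['.', 'u', 's']))
  else some (String.mk (PySem.Chars.replace (PySem.Chars.lower t) ['.'] []))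

def stooq_symbol_for_ticker_py (ticker : String) : Option String :=
  pvStooqA (PySem.Chars.strip ticker.toList)

-- ===== PORT B =====
-- the loop body of B's single scan: state (low, nodot, ext, seen_dot)
def pvStep (acc : List Char × List Char × List Char × Bool) (ch : Char) :
    List Char × List Char × List Char × Bool :=
  match acc with
  | (low, nodot, ext, seen) =>
    if ch = '.' then (low ++ [PySem.Chars.lowerChar ch], nodot, [], true)
    else (low ++ [PySem.Chars.lowerChar ch], nodot ++ [PySem.Chars.lowerChar ch],
          ext ++ [PySem.Chars.upperChar ch], seen)

-- country.get(key)
def pvCountryGet (k : List Char) : Option (List Char) :=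
  if k = ['L'] then some ['.', 'u', 'k']
  else if k = ['P', 'A'] then some ['.', 'f', 'r']
  else if k = ['A', 'S'] then some ['.', 'n', 'l']
  else if k = ['M', 'I'] then some ['.', 'i', 't']
  else if k = ['T', 'O'] then some ['.', 'c', 'a']
  else if k = ['A', 'X'] then some ['.', 'a', 'u']
  else if k = ['H', 'K'] then some ['.', 'h', 'k']
  else if k = ['S', 'A'] then some ['.', 'b', 'r']
  else if k = ['S', 'T'] then some ['.', 's', 'e']
  else none

-- body of B after 't = str(ticker).strip()', over the char list of t
def pvStooqB (t : List Char) : Option String :=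
  if t = [] then none
  else if t = ['S', 'P', 'Y'] then some "spy.us"
  else if t = ['X', 'L', 'E'] then some "xle.us"
  else if t = ['^', 'T', 'N', 'X'] then some "us10y"
  else if t = ['D', 'X', '-', 'Y', '.', 'N', 'Y', 'B'] then some "usdidx"
  else
    let st := t.foldl pvStep ([], [], [], false)
    let low := st.1
    let nodot := st.2.1
    let ext := st.2.2.1
    let seen := st.2.2.2
    if seen then
      match pvCountryGet ext with
      | some mapped =>
        some (String.mk (PySem.List.slice low none (some (-((ext.length : Int) + 1))) ++ mapped))
      | none =>
        if PySem.Chars.startswith t ['^'] then none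
        else some (String.mk nodot)
    else if PySem.Chars.startswith t ['^'] then none
    else some (String.mk (low ++ ['.', 'u', 's']))

def stooq_symbol_for_ticker_py_alt (ticker : String) : Option String :=
  pvStooqB (PySem.Chars.strip ticker.toList)

-- ===== PRECONDITION & SPEC =====
def Spec_stooq_symbol_for_ticker_py (ticker : String) (out : Option String) : Prop := out = stooq_symbol_for_ticker_py_alt ticker
instance (ticker : String) (out : Option String) : Decidable (Spec_stooq_symbol_for_ticker_py ticker out) := by unfold Spec_stooq_symbol_for_ticker_py; infer_instance

-- ===== CLAIM (what is proved, stated in full; the proofs are below) =====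
def Claim_equal_stooq_symbol_for_ticker_py : Prop := ∀ (ticker : String), Dom_stooq_symbol_for_ticker_py ticker → Spec_stooq_symbol_for_ticker_py ticker (stooq_symbol_for_ticker_py ticker)

-- ===== LEMMAS AND PROOFS =====

-- ASCII fact behind the case-insensitive suffix match: only '.' uppercases to '.'
theorem pv_up_eq_dot {c : Char} (h : PySem.Chars.upperChar c = '.') : c = '.' := by
  unfold PySem.Chars.upperChar PySem.Chars.islower at h
  split at h
  · next hc =>
    simp only [Bool.and_eq_true, decide_eq_true_eq, Char.le_def] at hc
    obtain ⟨h1, h2⟩ := hc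
    have hN : 97 ≤ c.toNat ∧ c.toNat ≤ 122 := ⟨h1, h2⟩
    have hvalid : (c.toNat - 32).isValidChar := by left; omega
    have h' := congrArg Char.toNat h
    rw [Char.toNat_ofNat, if_pos hvalid] at h'
    have : c.toNat - 32 = 46 := h'
    omega
  · exact h

-- and only '.' lowercases to '.'
theorem pv_low_eq_dot {c : Char} (h : PySem.Chars.lowerChar c = '.') : c = '.' := by
  unfold PySem.Chars.lowerChar PySem.Chars.isupper at h
  split at h
  · next hc =>
    simp only [Bool.and_eq_true, decide_eq_true_eq, Char.le_def] at hc
    obtain ⟨h1, h2⟩ := hc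
    have hN : 65 ≤ c.toNat ∧ c.toNat ≤ 90 := ⟨h1, h2⟩
    have hvalid : (c.toNat + 32).isValidChar := by left; omega
    have h' := congrArg Char.toNat h
    rw [Char.toNat_ofNat, if_pos hvalid] at h'
    have : c.toNat + 32 = 46 := h'
    omega
  · exact h

theorem pv_lowb_dot (c : Char) : (PySem.Chars.lowerChar c != '.') = (c != '.') := by
  by_cases hc : c = '.'
  · subst hc; decide
  · have h1 : (PySem.Chars.lowerChar c != '.') = true := by
      simpa using fun h => hc (pv_low_eq_dot h)
    have h2 : (c != '.') = true := by simpa using hc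
    rw [h1, h2]

-- t[:-(k+1)] is the part before the separator when the last k+1 chars are known
theorem pv_slice_neg (xs ys : List Char) (c : Char) :
    PySem.List.slice (xs ++ c :: ys) none (some (-((ys.length : Int) + 1))) = xs := by
  simp only [PySem.List.slice, PySem.List.clampIdx]
  rw [if_pos (by omega : -((ys.length : Int) + 1) < 0)]
  rw [if_neg (by simp; omega)]
  have h : (((xs ++ c :: ys).length : Int) + -(((ys.length : Int)) + 1)).toNat = xs.length := by
    simp; omega
  rw [h]
  simp [List.take_left']

-- reversed view of A's endswith test: s ++ ['.'] is a prefix of the uppercased reversed list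
-- iff the (reversed) extension after the last dot uppercases to s and a dot exists
theorem pv_prefix_dot_iff (s r : List Char) (hs : ∀ c ∈ s, c ≠ '.') :
    ((s ++ ['.']) <+: r.map PySem.Chars.upperChar) ↔
    ((r.takeWhile (fun c => c != '.')).map PySem.Chars.upperChar = s ∧
      r.dropWhile (fun c => c != '.') ≠ []) := by
  induction s generalizing r with
  | nil =>
    cases r with
    | nil => simp
    | cons c r' =>
      by_cases hc : c = '.'
      · subst hc
        simp [List.cons_prefix_cons]
        decide
      · simp only [List.nil_append, List.map_cons, List.cons_prefix_cons,
          List.takeWhile_cons, List.dropWhile_cons, if_pos (by simp [hc] : (c != '.') = true)]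
        constructor
        · rintro ⟨h1, -⟩; exact absurd (pv_up_eq_dot h1.symm) hc
        · rintro ⟨h1, -⟩; simp at h1
  | cons a s' ih =>
    have ha : a ≠ '.' := hs a (List.mem_cons_self ..)
    cases r with
    | nil => simp
    | cons c r' =>
      by_cases hc : c = '.'
      · subst hc
        simp only [List.cons_append, List.map_cons, List.cons_prefix_cons,
          List.takeWhile_cons, List.dropWhile_cons]
        simp only [show (('.' : Char) != '.') = false by decide, if_neg Bool.false_ne_true]
        constructor
        · rintro ⟨h1, -⟩; exact absurd (h1.trans (by decide)) ha
        · rintro ⟨h1, -⟩; simp at h1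
      · simp only [List.cons_append, List.map_cons, List.cons_prefix_cons,
          List.takeWhile_cons, List.dropWhile_cons, if_pos (by simp [hc] : (c != '.') = true)]
        rw [ih r' (fun x hx => hs x (List.mem_cons_of_mem _ hx))]
        simp only [List.cons.injEq]
        tauto

theorem pv_endswith_dot_iff (t S : List Char) (hS : ∀ x ∈ S, x ≠ '.') :
    (PySem.Chars.endswith (PySem.Chars.upper t) ('.' :: S) = true) ↔
    ((t.reverse.takeWhile (fun c => c != '.')).map PySem.Chars.upperChar = S.reverse ∧
      t.reverse.dropWhile (fun c => c != '.') ≠ []) := by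
  rw [PySem.Chars.endswith_iff, ← List.reverse_prefix]
  have h1 : (PySem.Chars.upper t).reverse = t.reverse.map PySem.Chars.upperChar := by
    simp [PySem.Chars.upper]
  rw [h1, List.reverse_cons]
  exact pv_prefix_dot_iff S.reverse t.reverse (fun c hc => hS c (List.mem_reverse.mp hc))

-- replace(·, '.', '') removes exactly the dots
theorem pv_replace_go_dot (fuel : Nat) (l acc : List Char) (h : l.length ≤ fuel) :
    PySem.Chars.replace.go ['.'] [] fuel l acc =
      acc.reverse ++ l.filter (fun c => c != '.') := by
  induction fuel generalizing l acc with
  | zero =>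
    have : l = [] := by cases l <;> simp_all
    subst this
    simp [PySem.Chars.replace.go]
  | succ n ih =>
    cases l with
    | nil => simp [PySem.Chars.replace.go]
    | cons c t =>
      rw [PySem.Chars.replace.go]
      by_cases hc : c = '.'
      · subst hc
        rw [if_pos (by simp [List.isPrefixOf])]
        simp only [List.length_cons] at h
        simp only [List.reverse_nil, List.nil_append]
        rw [show (List.drop ['.'].length ('.' :: t)) = t by simp]
        rw [ih t acc (by omega)]
        simp
      · have hpf : (['.'].isPrefixOf (c :: t)) = false := by
          simp only [List.isPrefixOf, Bool.and_eq_false_iff]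
          left
          exact beq_eq_false_iff_ne.mpr (Ne.symm hc)
        rw [if_neg (by simp [hpf])]
        simp only [List.length_cons] at h
        rw [ih t (c :: acc) (by omega)]
        simp [hc]

theorem pv_replace_dot (s : List Char) :
    PySem.Chars.replace s ['.'] [] = s.filter (fun c => c != '.') := by
  rw [PySem.Chars.replace]
  rw [if_neg (by simp)]
  simpa using pv_replace_go_dot s.length s [] le_rfl

-- characterisation of B's single scan
theorem pv_fold_eq (t : List Char) :
    t.foldl pvStep ([], [], [], false) =
      (t.map PySem.Chars.lowerChar,
       (t.filter (fun c => c != '.')).map PySem.Chars.lowerChar,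
       ((t.reverse.takeWhile (fun c => c != '.')).reverse).map PySem.Chars.upperChar,
       t.contains '.') := by
  induction t using List.reverseRecOn with
  | nil => simp
  | append_singleton xs c ih =>
    rw [List.foldl_append, ih]
    by_cases hc : c = '.'
    · subst hc
      simp [pvStep, List.filter_append, List.takeWhile_cons]
    · have hc' : ('.' : Char) ≠ c := Ne.symm hc
      simp [pvStep, hc, hc', List.filter_append, List.contains_eq_mem]

set_option maxRecDepth 8192 in
theorem pv_core_eq (t : List Char) : pvStooqA t = pvStooqB t := by
  unfold pvStooqA pvStooqB
  by_cases h0 : t = []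
  · simp [h0]
  by_cases h1 : t = ['S', 'P', 'Y']
  · simp [h1]
  by_cases h2 : t = ['X', 'L', 'E']
  · simp [h2]
  by_cases h3 : t = ['^', 'T', 'N', 'X']
  · simp [h3]
  by_cases h4 : t = ['D', 'X', '-', 'Y', '.', 'N', 'Y', 'B']
  · simp [h4]
  simp only [if_neg h0, if_neg h1, if_neg h2, if_neg h3, if_neg h4, pv_fold_eq]
  clear h0 h1 h2 h3 h4
  rcases hd : t.reverse.dropWhile (fun c => c != '.') with _ | ⟨c, rest⟩
  · -- no dot in t: every suffix test fails and both sides take the '.us' fallback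
    have hF0 : ∀ S, (∀ x ∈ S, x ≠ '.') →
        PySem.Chars.endswith (PySem.Chars.upper t) ('.' :: S) = false := by
      intro S hS
      rw [Bool.eq_false_iff, Ne, pv_endswith_dot_iff t S hS]
      rintro ⟨-, hne⟩; exact hne hd
    have hmem : '.' ∉ t := by
      intro hmem
      have := List.dropWhile_eq_nil_iff.mp hd '.' (by simpa using hmem)
      simp at this
    have hnodot : PySem.Chars.isIn ['.'] t = false := by
      rw [Bool.eq_false_iff, Ne, PySem.Chars.isIn_iff_infix, List.singleton_infix_iff]
      exact hmem
    have hseen : t.contains '.' = false := by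
      simp [List.contains_eq_mem, hmem]
    simp only [hF0 ['L'] (by simp), hF0 ['P', 'A'] (by simp), hF0 ['A', 'S'] (by simp),
      hF0 ['M', 'I'] (by simp), hF0 ['T', 'O'] (by simp), hF0 ['A', 'X'] (by simp),
      hF0 ['H', 'K'] (by simp), hF0 ['S', 'A'] (by simp), hF0 ['S', 'T'] (by simp),
      hseen, hnodot, Bool.false_eq_true, if_false, Bool.not_false, if_true]
    simp [PySem.Chars.lower]
  · -- t has a dot and c is the last one
    have hc : c = '.' := by
      have hne : t.reverse.dropWhile (fun c => c != '.') ≠ [] := by rw [hd]; simp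
      have h2 := List.head_dropWhile_not (fun c : Char => c != '.') hne
      have h3 : (t.reverse.dropWhile (fun c => c != '.')).head hne = c := by simp [hd]
      rw [h3] at h2
      simpa using h2
    subst hc
    set e := t.reverse.takeWhile (fun c => c != '.') with he
    have hsplit : t = rest.reverse ++ '.' :: e.reverse := by
      have h := List.takeWhile_append_dropWhile (p := fun c => c != '.') (l := t.reverse)
      rw [← he, hd] at h
      have h2 := congrArg List.reverse h
      simpa using h2.symm
    set u := e.map PySem.Chars.upperChar with hu
    have hiff : ∀ S, (∀ x ∈ S, x ≠ '.') →
        ((PySem.Chars.endswith (PySem.Chars.upper t) ('.' :: S) = true) ↔ u = S.reverse) := by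
      intro S hS
      rw [pv_endswith_dot_iff t S hS, ← he, ← hu, hd]
      simp
    have hF : ∀ S, (∀ x ∈ S, x ≠ '.') → ¬ u = S.reverse →
        PySem.Chars.endswith (PySem.Chars.upper t) ('.' :: S) = false := by
      intro S hS hne
      rw [Bool.eq_false_iff, Ne, hiff S hS]; exact hne
    have hT : ∀ S, (∀ x ∈ S, x ≠ '.') → u = S.reverse →
        PySem.Chars.endswith (PySem.Chars.upper t) ('.' :: S) = true := by
      intro S hS hEq; exact (hiff S hS).mpr hEq
    have hseen : t.contains '.' = true := by
      rw [hsplit]; simp [List.contains_eq_mem]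
    have hlow : t.map PySem.Chars.lowerChar
        = rest.reverse.map PySem.Chars.lowerChar ++ '.' :: e.reverse.map PySem.Chars.lowerChar := by
      rw [hsplit]; simp [show PySem.Chars.lowerChar '.' = '.' by decide]
    have hbB : PySem.List.slice (t.map PySem.Chars.lowerChar) none
          (some (-(((e.length : Int)) + 1)))
        = rest.reverse.map PySem.Chars.lowerChar := by
      rw [hlow, show -(((e.length : Int)) + 1)
            = -(((e.reverse.map PySem.Chars.lowerChar).length : Int) + 1) by simp]
      exact pv_slice_neg _ _ _
    have hbA : PySem.Chars.lower (PySem.List.slice t none (some (-(((e.length : Int)) + 1))))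
        = rest.reverse.map PySem.Chars.lowerChar := by
      rw [hsplit, show -(((e.length : Int)) + 1) = -((((e.reverse).length : Int)) + 1) by simp]
      rw [pv_slice_neg]
      simp [PySem.Chars.lower]
    by_cases hu1 : u = ['L']
    · have hkN : e.length = 1 := by
        have := congrArg List.length hu1; simpa [hu] using this
      have hget : pvCountryGet (e.reverse.map PySem.Chars.upperChar) = some ['.', 'u', 'k'] := by
        rw [List.map_reverse, ← hu, hu1]; decide
      have hbA' : PySem.Chars.lower (PySem.List.slice t none (some (-2)))
          = rest.reverse.map PySem.Chars.lowerChar := by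
        rw [show (-2 : Int) = -(((e.length : Int)) + 1) by rw [hkN]; norm_num]
        exact hbA
      simp only [hT ['L'] (by simp) hu1, hget, Bool.false_eq_true, if_false, eq_self_iff_true, if_true, hseen, List.length_map, List.length_reverse, hbB, hbA']
    by_cases hu2 : u = ['A', 'P']
    · have hkN : e.length = 2 := by
        have := congrArg List.length hu2; simpa [hu] using this
      have hget : pvCountryGet (e.reverse.map PySem.Chars.upperChar) = some ['.', 'f', 'r'] := by
        rw [List.map_reverse, ← hu, hu2]; decide
      have hbA' : PySem.Chars.lower (PySem.List.slice t none (some (-3)))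
          = rest.reverse.map PySem.Chars.lowerChar := by
        rw [show (-3 : Int) = -(((e.length : Int)) + 1) by rw [hkN]; norm_num]
        exact hbA
      simp only [hF ['L'] (by simp) hu1, hT ['P', 'A'] (by simp) hu2, hget, Bool.false_eq_true, if_false, eq_self_iff_true, if_true, hseen, List.length_map, List.length_reverse, hbB, hbA']
    by_cases hu3 : u = ['S', 'A']
    · have hkN : e.length = 2 := by
        have := congrArg List.length hu3; simpa [hu] using this
      have hget : pvCountryGet (e.reverse.map PySem.Chars.upperChar) = some ['.', 'n', 'l'] := by
        rw [List.map_reverse, ← hu, hu3]; decide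
      have hbA' : PySem.Chars.lower (PySem.List.slice t none (some (-3)))
          = rest.reverse.map PySem.Chars.lowerChar := by
        rw [show (-3 : Int) = -(((e.length : Int)) + 1) by rw [hkN]; norm_num]
        exact hbA
      simp only [hF ['L'] (by simp) hu1, hF ['P', 'A'] (by simp) hu2, hT ['A', 'S'] (by simp) hu3, hget, Bool.false_eq_true, if_false, eq_self_iff_true, if_true, hseen, List.length_map, List.length_reverse, hbB, hbA']
    by_cases hu4 : u = ['I', 'M']
    · have hkN : e.length = 2 := by
        have := congrArg List.length hu4; simpa [hu] using this
      have hget : pvCountryGet (e.reverse.map PySem.Chars.upperChar) = some ['.', 'i', 't'] := by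
        rw [List.map_reverse, ← hu, hu4]; decide
      have hbA' : PySem.Chars.lower (PySem.List.slice t none (some (-3)))
          = rest.reverse.map PySem.Chars.lowerChar := by
        rw [show (-3 : Int) = -(((e.length : Int)) + 1) by rw [hkN]; norm_num]
        exact hbA
      simp only [hF ['L'] (by simp) hu1, hF ['P', 'A'] (by simp) hu2, hF ['A', 'S'] (by simp) hu3, hT ['M', 'I'] (by simp) hu4, hget, Bool.false_eq_true, if_false, eq_self_iff_true, if_true, hseen, List.length_map, List.length_reverse, hbB, hbA']
    by_cases hu5 : u = ['O', 'T']
    · have hkN : e.length = 2 := by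
        have := congrArg List.length hu5; simpa [hu] using this
      have hget : pvCountryGet (e.reverse.map PySem.Chars.upperChar) = some ['.', 'c', 'a'] := by
        rw [List.map_reverse, ← hu, hu5]; decide
      have hbA' : PySem.Chars.lower (PySem.List.slice t none (some (-3)))
          = rest.reverse.map PySem.Chars.lowerChar := by
        rw [show (-3 : Int) = -(((e.length : Int)) + 1) by rw [hkN]; norm_num]
        exact hbA
      simp only [hF ['L'] (by simp) hu1, hF ['P', 'A'] (by simp) hu2, hF ['A', 'S'] (by simp) hu3, hF ['M', 'I'] (by simp) hu4, hT ['T', 'O'] (by simp) hu5, hget, Bool.false_eq_true, if_false, eq_self_iff_true, if_true, hseen, List.length_map, List.length_reverse, hbB, hbA']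
    by_cases hu6 : u = ['X', 'A']
    · have hkN : e.length = 2 := by
        have := congrArg List.length hu6; simpa [hu] using this
      have hget : pvCountryGet (e.reverse.map PySem.Chars.upperChar) = some ['.', 'a', 'u'] := by
        rw [List.map_reverse, ← hu, hu6]; decide
      have hbA' : PySem.Chars.lower (PySem.List.slice t none (some (-3)))
          = rest.reverse.map PySem.Chars.lowerChar := by
        rw [show (-3 : Int) = -(((e.length : Int)) + 1) by rw [hkN]; norm_num]
        exact hbA
      simp only [hF ['L'] (by simp) hu1, hF ['P', 'A'] (by simp) hu2, hF ['A', 'S'] (by simp) hu3, hF ['M', 'I'] (by simp) hu4, hF ['T', 'O'] (by simp) hu5, hT ['A', 'X'] (by simp) hu6, hget, Bool.false_eq_true, if_false, eq_self_iff_true, if_true, hseen, List.length_map, List.length_reverse, hbB, hbA']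
    by_cases hu7 : u = ['K', 'H']
    · have hkN : e.length = 2 := by
        have := congrArg List.length hu7; simpa [hu] using this
      have hget : pvCountryGet (e.reverse.map PySem.Chars.upperChar) = some ['.', 'h', 'k'] := by
        rw [List.map_reverse, ← hu, hu7]; decide
      have hbA' : PySem.Chars.lower (PySem.List.slice t none (some (-3)))
          = rest.reverse.map PySem.Chars.lowerChar := by
        rw [show (-3 : Int) = -(((e.length : Int)) + 1) by rw [hkN]; norm_num]
        exact hbA
      simp only [hF ['L'] (by simp) hu1, hF ['P', 'A'] (by simp) hu2, hF ['A', 'S'] (by simp) hu3, hF ['M', 'I'] (by simp) hu4, hF ['T', 'O'] (by simp) hu5, hF ['A', 'X'] (by simp) hu6, hT ['H', 'K'] (by simp) hu7, hget, Bool.false_eq_true, if_false, eq_self_iff_true, if_true, hseen, List.length_map, List.length_reverse, hbB, hbA']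
    by_cases hu8 : u = ['A', 'S']
    · have hkN : e.length = 2 := by
        have := congrArg List.length hu8; simpa [hu] using this
      have hget : pvCountryGet (e.reverse.map PySem.Chars.upperChar) = some ['.', 'b', 'r'] := by
        rw [List.map_reverse, ← hu, hu8]; decide
      have hbA' : PySem.Chars.lower (PySem.List.slice t none (some (-3)))
          = rest.reverse.map PySem.Chars.lowerChar := by
        rw [show (-3 : Int) = -(((e.length : Int)) + 1) by rw [hkN]; norm_num]
        exact hbA
      simp only [hF ['L'] (by simp) hu1, hF ['P', 'A'] (by simp) hu2, hF ['A', 'S'] (by simp) hu3, hF ['M', 'I'] (by simp) hu4, hF ['T', 'O'] (by simp) hu5, hF ['A', 'X'] (by simp) hu6, hF ['H', 'K'] (by simp) hu7, hT ['S', 'A'] (by simp) hu8, hget, Bool.false_eq_true, if_false, eq_self_iff_true, if_true, hseen, List.length_map, List.length_reverse, hbB, hbA']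
    by_cases hu9 : u = ['T', 'S']
    · have hkN : e.length = 2 := by
        have := congrArg List.length hu9; simpa [hu] using this
      have hget : pvCountryGet (e.reverse.map PySem.Chars.upperChar) = some ['.', 's', 'e'] := by
        rw [List.map_reverse, ← hu, hu9]; decide
      have hbA' : PySem.Chars.lower (PySem.List.slice t none (some (-3)))
          = rest.reverse.map PySem.Chars.lowerChar := by
        rw [show (-3 : Int) = -(((e.length : Int)) + 1) by rw [hkN]; norm_num]
        exact hbA
      simp only [hF ['L'] (by simp) hu1, hF ['P', 'A'] (by simp) hu2, hF ['A', 'S'] (by simp) hu3, hF ['M', 'I'] (by simp) hu4, hF ['T', 'O'] (by simp) hu5, hF ['A', 'X'] (by simp) hu6, hF ['H', 'K'] (by simp) hu7, hF ['S', 'A'] (by simp) hu8, hT ['S', 'T'] (by simp) hu9, hget, Bool.false_eq_true, if_false, eq_self_iff_true, if_true, hseen, List.length_map, List.length_reverse, hbB, hbA']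
    -- miss: no suffix matches; A takes the replace branch, B returns nodot
    have hget : pvCountryGet (e.reverse.map PySem.Chars.upperChar) = none := by
      rw [List.map_reverse, ← hu]
      unfold pvCountryGet
      rw [if_neg (fun h => hu1 (by simpa [List.reverse_eq_iff] using h))]
      rw [if_neg (fun h => hu2 (by simpa [List.reverse_eq_iff] using h))]
      rw [if_neg (fun h => hu3 (by simpa [List.reverse_eq_iff] using h))]
      rw [if_neg (fun h => hu4 (by simpa [List.reverse_eq_iff] using h))]
      rw [if_neg (fun h => hu5 (by simpa [List.reverse_eq_iff] using h))]
      rw [if_neg (fun h => hu6 (by simpa [List.reverse_eq_iff] using h))]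
      rw [if_neg (fun h => hu7 (by simpa [List.reverse_eq_iff] using h))]
      rw [if_neg (fun h => hu8 (by simpa [List.reverse_eq_iff] using h))]
      rw [if_neg (fun h => hu9 (by simpa [List.reverse_eq_iff] using h))]
    have hdot : PySem.Chars.isIn ['.'] t = true := by
      rw [PySem.Chars.isIn_iff_infix, List.singleton_infix_iff, hsplit]
      simp
    have hrepl : PySem.Chars.replace (PySem.Chars.lower t) ['.'] []
        = (t.filter (fun c => c != '.')).map PySem.Chars.lowerChar := by
      rw [show PySem.Chars.lower t = t.map PySem.Chars.lowerChar by simp [PySem.Chars.lower]]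
      rw [pv_replace_dot, List.filter_map]
      exact congrArg (List.map PySem.Chars.lowerChar)
        (List.filter_congr (fun c _ => by simpa [Function.comp] using pv_lowb_dot c))
    simp only [hF ['L'] (by simp) hu1, hF ['P', 'A'] (by simp) hu2, hF ['A', 'S'] (by simp) hu3, hF ['M', 'I'] (by simp) hu4, hF ['T', 'O'] (by simp) hu5, hF ['A', 'X'] (by simp) hu6, hF ['H', 'K'] (by simp) hu7, hF ['S', 'A'] (by simp) hu8, hF ['S', 'T'] (by simp) hu9,
      Bool.false_eq_true, if_false, hseen, hget, hdot, Bool.not_true, if_true, hrepl]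

theorem stooq_symbol_for_ticker_py_spec : Claim_equal_stooq_symbol_for_ticker_py := by
  intro ticker _
  unfold Spec_stooq_symbol_for_ticker_py stooq_symbol_for_ticker_py stooq_symbol_for_ticker_py_alt
  exact pv_core_eq _
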